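-- pv_equiv track=rewrite | github.com/grymmjack/DRAW | UTILS/align-qb64pe.py | _align_case_groups
-- ===== SOURCE A (Python) =====
-- def find_eq_pos(line: str) -> int:
--     """Return the index of the assignment '=' outside strings, or -1.
--
--     Returns -1 for blank lines, pure comment lines, and lines with no '='.
--     Skips '=' that is part of <=, >= or <> comparisons.
--     """
--     stripped = line.lstrip()
--     if not stripped or stripped.startswith("'") or stripped.upper().startswith("REM "):
--         return -1
--
--     in_string = False
--     i = 0
--     while i < len(line):
--         ch = line[i]
--         if ch == '"':
--             if in_string:
--                 if i + 1 < len(line) and line[i + 1] == '"':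
--                     i += 2
--                     continue
--                 in_string = False
--             else:
--                 in_string = True
--         elif ch == '=' and not in_string:
--             # Skip <=, >=, <>
--             if i > 0 and line[i - 1] in '<>!':
--                 pass
--             else:
--                 return i
--         i += 1
--     return -1
--
-- def get_ending(line: str) -> str:
--     if line.endswith('\r\n'):
--         return '\r\n'
--     if line.endswith('\n'):
--         return '\n'
--     if line.endswith('\r'):
--         return '\r'
--     return ''
--
-- def _align_case_groups(groups: list, lines: list[str], case_gap: int, eq_gap: int) -> tuple[list[str], int]:
--     """Apply two-column alignment to a list of CASE groups.
--
--     Column 1: the assignment start (after ':').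
--     Column 2: the '=' within the assignment.
--     """
--     result = list(lines)
--     changed = 0
--
--     for group in groups:
--         if len(group) < 2:
--             continue
--
--         # --- Phase 1: align the ':' / assignment-start column ---
--         max_label = max(len(raw[:pos + 1].rstrip()) for _, raw, pos in group)
--         target_asgn = max_label + case_gap
--
--         step1 = []  # (idx, rebuilt_raw)
--         for idx, raw, pos in group:
--             label = raw[:pos + 1].rstrip()       # '    CASE "KEY":'
--             assignment = raw[pos + 1:].lstrip()  # 'THEME.field = val'
--             new_raw = label.ljust(target_asgn) + assignment
--             step1.append((idx, new_raw))
--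
--         # --- Phase 2: align '=' inside the assignment portion ---
--         eq_info = []  # (idx, new_raw, eq_pos_local, asgn_lhs_len)
--         for idx, new_raw in step1:
--             asgn = new_raw[target_asgn:]
--             eq_pos_local = find_eq_pos(asgn)
--             if eq_pos_local != -1:
--                 asgn_lhs = asgn[:eq_pos_local].rstrip()
--                 eq_info.append((idx, new_raw, eq_pos_local, len(asgn_lhs)))
--             else:
--                 eq_info.append((idx, new_raw, -1, 0))
--
--         has_eq = [x for x in eq_info if x[2] != -1]
--         if has_eq:
--             max_asgn_lhs = max(x[3] for x in has_eq)
--             eq_target = target_asgn + max_asgn_lhs + eq_gap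
--         else:
--             eq_target = None
--
--         for idx, new_raw, eq_pos_local, _ in eq_info:
--             if eq_target is not None and eq_pos_local != -1:
--                 before_eq = new_raw[:target_asgn] + new_raw[target_asgn:target_asgn + eq_pos_local].rstrip()
--                 after_eq = new_raw[target_asgn + eq_pos_local + 1:].lstrip()
--                 final_raw = before_eq.ljust(eq_target) + '= ' + after_eq
--             else:
--                 final_raw = new_raw
--
--             ending = get_ending(lines[idx])
--             new_line = final_raw + ending
--             if new_line != lines[idx]:
--                 changed += 1
--                 result[idx] = new_line
--
--     return result, changed
-- ===== SOURCE B (Python) =====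
-- def find_eq_pos(line: str) -> int:
--     """Return the index of the assignment '=' outside strings, or -1."""
--     stripped = line.lstrip()
--     if not stripped or stripped.startswith("'") or stripped.upper().startswith("REM "):
--         return -1
--     in_string = False
--     i = 0
--     while i < len(line):
--         ch = line[i]
--         if ch == '"':
--             if in_string:
--                 if i + 1 < len(line) and line[i + 1] == '"':
--                     i += 2
--                     continue
--                 in_string = False
--             else:
--                 in_string = True
--         elif ch == '=' and not in_string:
--             if i > 0 and line[i - 1] in '<>!':
--                 pass
--             else:
--                 return i
--         i += 1
--     return -1
--
-- def get_ending(line: str) -> str: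
--     if line.endswith('\r\n'):
--         return '\r\n'
--     if line.endswith('\n'):
--         return '\n'
--     if line.endswith('\r'):
--         return '\r'
--     return ''
--
-- def _align_case_groups(groups: list, lines: list[str], case_gap: int, eq_gap: int) -> tuple[list[str], int]:
--     """Two-column CASE alignment, rebuilt in one parse pass + one render pass per group."""
--     result = list(lines)
--     changed = 0
--
--     for group in groups:
--         if len(group) < 2:
--             continue
--
--         # Parse every member once: no intermediate rebuilt string is ever re-scanned.
--         parsed = []
--         for idx, raw, pos in group:
--             label = raw[:pos + 1].rstrip()
--             assignment = raw[pos + 1:].lstrip()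
--             eq = find_eq_pos(assignment)
--             lhs = assignment[:eq].rstrip() if eq != -1 else ''
--             rhs = assignment[eq + 1:].lstrip() if eq != -1 else ''
--             parsed.append((idx, label, assignment, eq, lhs, rhs))
--
--         target_asgn = max(len(p[1]) for p in parsed) + case_gap
--         eq_target = target_asgn + max((len(p[4]) for p in parsed if p[3] != -1), default=0) + eq_gap
--
--         # Render each final line directly from the parsed pieces.
--         for idx, label, assignment, eq, lhs, rhs in parsed:
--             if eq != -1:
--                 final_raw = (label.ljust(target_asgn) + lhs).ljust(eq_target) + '= ' + rhs
--             else: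
--                 final_raw = label.ljust(target_asgn) + assignment
--             new_line = final_raw + get_ending(lines[idx])
--             if new_line != lines[idx]:
--                 changed += 1
--                 result[idx] = new_line
--
--     return result, changed
-- ===== Notes on version B (the rewrite author's own statement) =====
-- stated objective: simpler
-- what changed: Each group is now handled by one parse pass (idx, label, assignment, eq, lhs, rhs per member) plus one direct render pass, replacing A's chain of building a padded line, re-slicing it, re-running find_eq_pos on the slice and re-slicing again.
import Mathlib
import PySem

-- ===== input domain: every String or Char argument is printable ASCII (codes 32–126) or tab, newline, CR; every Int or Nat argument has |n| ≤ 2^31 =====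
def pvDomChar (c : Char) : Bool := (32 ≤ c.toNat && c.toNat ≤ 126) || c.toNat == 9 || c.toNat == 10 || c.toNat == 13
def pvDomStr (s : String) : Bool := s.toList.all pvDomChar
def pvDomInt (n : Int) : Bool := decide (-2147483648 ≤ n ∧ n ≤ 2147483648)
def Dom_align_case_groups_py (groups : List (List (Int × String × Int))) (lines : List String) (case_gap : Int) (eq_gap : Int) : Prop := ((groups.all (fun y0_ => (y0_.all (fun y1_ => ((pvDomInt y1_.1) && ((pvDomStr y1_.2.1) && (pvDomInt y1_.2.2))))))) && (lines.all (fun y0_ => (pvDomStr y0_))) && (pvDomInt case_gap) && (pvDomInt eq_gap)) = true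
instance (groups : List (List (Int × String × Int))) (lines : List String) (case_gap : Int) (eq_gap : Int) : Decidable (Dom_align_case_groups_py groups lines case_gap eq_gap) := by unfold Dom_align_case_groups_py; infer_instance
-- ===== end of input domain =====

-- B replaces A's rebuild-then-reparse chain (build padded line, re-slice it, re-run find_eq_pos
-- on the slice, re-slice again) by one parse pass per group member plus one direct render pass
-- (objective: simpler).  Equivalence of the RETURN value is proved on Pre_ (case_gap ≥ 0, all
-- group indices in Python range of `lines`).

-- ===== SHARED HELPERS (ports of the module helpers find_eq_pos / get_ending, used by both Pythons) =====

-- str.ljust(w): exact for every Int width (no padding when w ≤ len(s))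
def pvLjust (s : List Char) (w : Int) : List Char :=
  s ++ List.replicate (w - (s.length : Int)).toNat ' '

-- the while-loop of find_eq_pos: prev = line[i-1] (none at i = 0); the double-quote case
-- consumes two characters (i += 2; continue) exactly as the Python does
def pvFindEqLoop : List Char → Bool → Option Char → Int → Int
  | [], _, _, _ => -1
  | c :: rest, inStr, prev, i =>
    if c = '"' then
      if inStr then
        if rest.head? = some '"' then pvFindEqLoop rest.tail true (some '"') (i + 2)
        else pvFindEqLoop rest false (some '"') (i + 1)
      else pvFindEqLoop rest true (some '"') (i + 1)
    else if c = '=' ∧ inStr = false then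
      if prev = some '<' ∨ prev = some '>' ∨ prev = some '!' then
        pvFindEqLoop rest inStr (some c) (i + 1)
      else i
    else pvFindEqLoop rest inStr (some c) (i + 1)
termination_by l _ _ _ => l.length
decreasing_by all_goals (simp [List.length_tail]; try omega)

-- find_eq_pos (stripped = line.lstrip(), written inline)
def pvFindEqPos (line : List Char) : Int :=
  if PySem.Chars.lstrip line = [] ∨ PySem.Chars.startswith (PySem.Chars.lstrip line) ['\''] = true ∨
      PySem.Chars.startswith (PySem.Chars.upper (PySem.Chars.lstrip line)) ['R', 'E', 'M', ' '] = true
  then -1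
  else pvFindEqLoop line false none 0

-- get_ending
def pvGetEnding (line : List Char) : List Char :=
  if PySem.Chars.endswith line ['\r', '\n'] then ['\r', '\n']
  else if PySem.Chars.endswith line ['\n'] then ['\n']
  else if PySem.Chars.endswith line ['\r'] then ['\r']
  else []

-- result[idx] = v with Python index semantics (negative wraps; out of range = IndexError,
-- excluded by Pre_, left unchanged here)
def pvSetIdx (xs : List (List Char)) (i : Int) (v : List Char) : List (List Char) :=
  let j := if i < 0 then i + (xs.length : Int) else i
  if 0 ≤ j ∧ j < (xs.length : Int) then xs.set j.toNat v else xs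

-- raw[:pos+1].rstrip() and raw[pos+1:].lstrip() — the two parses both Pythons perform verbatim
def pvLabel (raw : List Char) (pos : Int) : List Char :=
  PySem.Chars.rstrip (PySem.List.slice raw none (some (pos + 1)))
def pvAsgn (raw : List Char) (pos : Int) : List Char :=
  PySem.Chars.lstrip (PySem.List.slice raw (some (pos + 1)) none)

-- ===== PORT A =====

-- phase 1 loop body: (idx, new_raw)
def pvStep1A (target : Int) (t : Int × List Char × Int) : Int × List Char :=
  (t.1, pvLjust (pvLabel t.2.1 t.2.2) target ++ pvAsgn t.2.1 t.2.2)

-- phase 2 loop body: (idx, new_raw, eq_pos_local, len(asgn_lhs))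
def pvEqInfoA (target : Int) (p : Int × List Char) : Int × List Char × Int × Int :=
  let asgn := PySem.List.slice p.2 (some target) none
  let e := pvFindEqPos asgn
  if e ≠ -1 then
    (p.1, p.2, e, ((PySem.Chars.rstrip (PySem.List.slice asgn none (some e))).length : Int))
  else (p.1, p.2, (-1 : Int), (0 : Int))

-- final loop body of A
def pvRenderA (lines : List (List Char)) (target : Int) (eqTarget? : Option Int)
    (st : List (List Char) × Int) (x : Int × List Char × Int × Int) : List (List Char) × Int :=
  let finalRaw :=
    match eqTarget? with
    | some et =>
      if x.2.2.1 ≠ -1 then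
        pvLjust (PySem.List.slice x.2.1 none (some target) ++
            PySem.Chars.rstrip (PySem.List.slice x.2.1 (some target) (some (target + x.2.2.1)))) et
          ++ ['=', ' '] ++ PySem.Chars.lstrip (PySem.List.slice x.2.1 (some (target + x.2.2.1 + 1)) none)
      else x.2.1
    | none => x.2.1
  let orig := (PySem.List.pyGet? lines x.1).getD []
  let newLine := finalRaw ++ pvGetEnding orig
  if newLine ≠ orig then (pvSetIdx st.1 x.1 newLine, st.2 + 1) else st

-- one `for group in groups` iteration of A
def pvStepA (lines : List (List Char)) (case_gap eq_gap : Int)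
    (st : List (List Char) × Int) (g : List (Int × List Char × Int)) : List (List Char) × Int :=
  if g.length < 2 then st
  else
    let maxLabel : Int :=
      (PySem.List.max? (g.map (fun t => ((pvLabel t.2.1 t.2.2).length : Int))) (fun x => x)).getD 0
    let target := maxLabel + case_gap
    let step1 := g.map (pvStep1A target)
    let eqInfo := step1.map (pvEqInfoA target)
    let hasEq := eqInfo.filter (fun x => x.2.2.1 ≠ -1)
    let eqTarget? : Option Int :=
      if hasEq.isEmpty then none
      else some (target + (PySem.List.max? (hasEq.map (fun x => x.2.2.2)) (fun x => x)).getD 0 + eq_gap)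
    eqInfo.foldl (pvRenderA lines target eqTarget?) st

def align_case_groups_py (groups : List (List (Int × String × Int))) (lines : List String) (case_gap : Int) (eq_gap : Int) : List String × Int :=
  let linesC := lines.map String.toList
  let groupsC := groups.map (fun g => g.map (fun t => (t.1, t.2.1.toList, t.2.2)))
  let r := groupsC.foldl (pvStepA linesC case_gap eq_gap) (linesC, 0)
  (r.1.map String.ofList, r.2)

-- ===== PORT B =====

-- parse one member once: (idx, label, assignment, eq, lhs, rhs)
def pvParse (t : Int × List Char × Int) : Int × List Char × List Char × Int × List Char × List Char :=
  let label := pvLabel t.2.1 t.2.2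
  let asgn := pvAsgn t.2.1 t.2.2
  let e := pvFindEqPos asgn
  (t.1, label, asgn, e,
    if e ≠ -1 then PySem.Chars.rstrip (PySem.List.slice asgn none (some e)) else [],
    if e ≠ -1 then PySem.Chars.lstrip (PySem.List.slice asgn (some (e + 1)) none) else [])

-- render one parsed member directly from its pieces
def pvRenderB (lines : List (List Char)) (target eqTarget : Int)
    (st : List (List Char) × Int) (p : Int × List Char × List Char × Int × List Char × List Char) :
    List (List Char) × Int :=
  let finalRaw :=
    if p.2.2.2.1 ≠ -1 then
      pvLjust (pvLjust p.2.1 target ++ p.2.2.2.2.1) eqTarget ++ ['=', ' '] ++ p.2.2.2.2.2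
    else pvLjust p.2.1 target ++ p.2.2.1
  let orig := (PySem.List.pyGet? lines p.1).getD []
  let newLine := finalRaw ++ pvGetEnding orig
  if newLine ≠ orig then (pvSetIdx st.1 p.1 newLine, st.2 + 1) else st

-- one `for group in groups` iteration of B: parse pass, two maxima, render pass
def pvStepB (lines : List (List Char)) (case_gap eq_gap : Int)
    (st : List (List Char) × Int) (g : List (Int × List Char × Int)) : List (List Char) × Int :=
  if g.length < 2 then st
  else
    let parsed := g.map pvParse
    let target : Int :=
      (PySem.List.maxD (parsed.map (fun p => (p.2.1.length : Int))) (fun x => x) 0) + case_gap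
    let eqTarget : Int :=
      target +
        PySem.List.maxD ((parsed.filter (fun p => p.2.2.2.1 ≠ -1)).map
          (fun p => (p.2.2.2.2.1.length : Int))) (fun x => x) 0 + eq_gap
    parsed.foldl (pvRenderB lines target eqTarget) st

def align_case_groups_py_alt (groups : List (List (Int × String × Int))) (lines : List String) (case_gap : Int) (eq_gap : Int) : List String × Int :=
  let linesC := lines.map String.toList
  let groupsC := groups.map (fun g => g.map (fun t => (t.1, t.2.1.toList, t.2.2)))
  let r := groupsC.foldl (pvStepB linesC case_gap eq_gap) (linesC, 0)
  (r.1.map String.ofList, r.2)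

-- ===== PRECONDITION & SPEC =====
-- For groups that are actually aligned (≥ 2 members), Pre_ excludes (a) inputs where Python A
-- raises IndexError (a member index outside lines' Python range), and (b) negative case_gap — a
-- negative column gap is outside the task's natural domain (there A's phase-2 re-slice
-- new_raw[target_asgn:] cuts into the label text, which B does not reproduce).
def Pre_align_case_groups_py (groups : List (List (Int × String × Int))) (lines : List String) (case_gap : Int) (eq_gap : Int) : Prop :=
  ∀ g ∈ groups, 2 ≤ g.length →
    0 ≤ case_gap ∧ ∀ t ∈ g, -(lines.length : Int) ≤ t.1 ∧ t.1 < (lines.length : Int)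
instance (groups : List (List (Int × String × Int))) (lines : List String) (case_gap : Int) (eq_gap : Int) : Decidable (Pre_align_case_groups_py groups lines case_gap eq_gap) := by unfold Pre_align_case_groups_py; infer_instance

def pvWitness_align_case_groups_py : (List (List (Int × String × Int))) × List String × Int × Int :=
  ([[(0, "CASE A: x = 1", 6), (1, "CASE BB: y = 2", 7)]],
   ["CASE A: x = 1", "CASE BB: y = 2"], 1, 1)

def Spec_align_case_groups_py (groups : List (List (Int × String × Int))) (lines : List String) (case_gap : Int) (eq_gap : Int) (out : List String × Int) : Prop := out = align_case_groups_py_alt groups lines case_gap eq_gap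
instance (groups : List (List (Int × String × Int))) (lines : List String) (case_gap : Int) (eq_gap : Int) (out : List String × Int) : Decidable (Spec_align_case_groups_py groups lines case_gap eq_gap out) := by unfold Spec_align_case_groups_py; infer_instance

-- ===== CLAIM (what is proved, stated in full; the proofs are below) =====
def Claim_equal_align_case_groups_py : Prop := ∀ (groups : List (List (Int × String × Int))) (lines : List String) (case_gap : Int) (eq_gap : Int), Dom_align_case_groups_py groups lines case_gap eq_gap → Pre_align_case_groups_py groups lines case_gap eq_gap → Spec_align_case_groups_py groups lines case_gap eq_gap (align_case_groups_py groups lines case_gap eq_gap)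

-- ===== LEMMAS AND PROOFS =====

theorem pvLjust_length {s : List Char} {w : Int} (h : (s.length : Int) ≤ w) :
    ((pvLjust s w).length : Int) = w := by
  simp [pvLjust]
  omega

-- canonical form of one phase-2 entry of A, expressed over the original member (proof-only)
def pvMkEntry (target : Int) (t : Int × List Char × Int) : Int × List Char × Int × Int :=
  (t.1, pvLjust (pvLabel t.2.1 t.2.2) target ++ pvAsgn t.2.1 t.2.2,
    pvFindEqPos (pvAsgn t.2.1 t.2.2),
    if pvFindEqPos (pvAsgn t.2.1 t.2.2) ≠ -1 then
      ((PySem.Chars.rstrip (PySem.List.slice (pvAsgn t.2.1 t.2.2) none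
          (some (pvFindEqPos (pvAsgn t.2.1 t.2.2))))).length : Int)
    else 0)

theorem pvLjust_len_toNat {s : List Char} {w : Int} (h : (s.length : Int) ≤ w) (h0 : 0 ≤ w) :
    (pvLjust s w).length = w.toNat := by
  have := pvLjust_length h
  omega

theorem pvNR_from {L A : List Char} {target : Int} (hL : (L.length : Int) ≤ target)
    (h0 : 0 ≤ target) :
    PySem.List.slice (pvLjust L target ++ A) (some target) none = A := by
  rw [PySem.List.slice_from _ h0, ← pvLjust_len_toNat hL h0, List.drop_left]

theorem pvNR_to {L A : List Char} {target : Int} (hL : (L.length : Int) ≤ target)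
    (h0 : 0 ≤ target) :
    PySem.List.slice (pvLjust L target ++ A) none (some target) = pvLjust L target := by
  rw [PySem.List.slice_to _ h0, ← pvLjust_len_toNat hL h0, List.take_left]

theorem pvNR_seg {L A : List Char} {target e : Int} (hL : (L.length : Int) ≤ target)
    (h0 : 0 ≤ target) (he : 0 ≤ e) :
    PySem.List.slice (pvLjust L target ++ A) (some target) (some (target + e)) =
      PySem.List.slice A none (some e) := by
  rw [PySem.List.slice_toNat _ h0 (by omega), PySem.List.slice_to _ he,
    ← pvLjust_len_toNat hL h0, List.drop_left]
  congr 1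
  have := pvLjust_len_toNat hL h0
  omega

theorem pvNR_after {L A : List Char} {target e : Int} (hL : (L.length : Int) ≤ target)
    (h0 : 0 ≤ target) (he : 0 ≤ e) :
    PySem.List.slice (pvLjust L target ++ A) (some (target + e + 1)) none =
      PySem.List.slice A (some (e + 1)) none := by
  rw [PySem.List.slice_from _ (by omega), PySem.List.slice_from _ (by omega), List.drop_append]
  have hlen := pvLjust_len_toNat hL h0
  rw [List.drop_eq_nil_of_le (by omega)]
  simp only [List.nil_append]
  congr 1
  omega

theorem pvFindEqLoop_lb (n : Nat) : ∀ (cs : List Char), cs.length ≤ n → ∀ b p (i : Int),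
    pvFindEqLoop cs b p i = -1 ∨ i ≤ pvFindEqLoop cs b p i := by
  induction n with
  | zero =>
    intro cs hlen b p i
    have h0 : cs = [] := List.eq_nil_of_length_eq_zero (by omega)
    subst h0; left; rw [pvFindEqLoop]
  | succ n ih =>
    intro cs hlen b p i
    match cs with
    | [] => left; rw [pvFindEqLoop]
    | c :: rest =>
      simp only [List.length_cons] at hlen
      rw [pvFindEqLoop]
      split
      · split
        · split
          · rcases ih rest.tail (by simp [List.length_tail]; omega) true (some '"') (i + 2) with h | h
            · left; exact h
            · right; omega
          · rcases ih rest (by omega) false (some '"') (i + 1) with h | h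
            · left; exact h
            · right; omega
        · rcases ih rest (by omega) true (some '"') (i + 1) with h | h
          · left; exact h
          · right; omega
      · split
        · split
          · rcases ih rest (by omega) b (some c) (i + 1) with h | h
            · left; exact h
            · right; omega
          · right; omega
        · rcases ih rest (by omega) b (some c) (i + 1) with h | h
          · left; exact h
          · right; omega

theorem pvFindEqPos_nonneg {l : List Char} (h : pvFindEqPos l ≠ -1) : 0 ≤ pvFindEqPos l := by
  unfold pvFindEqPos at h ⊢
  split
  · rename_i hc
    rw [if_pos hc] at h
    exact absurd rfl h
  · rename_i hc
    rw [if_neg hc] at h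
    rcases pvFindEqLoop_lb l.length l le_rfl false none 0 with h1 | h1
    · exact absurd h1 h
    · exact h1

theorem pvEntry_eq (target : Int) (t : Int × List Char × Int)
    (hL : (((pvLabel t.2.1 t.2.2).length : Int)) ≤ target) (h0 : 0 ≤ target) :
    pvEqInfoA target (pvStep1A target t) = pvMkEntry target t := by
  unfold pvEqInfoA pvStep1A pvMkEntry
  simp only [pvNR_from hL h0]
  by_cases he : pvFindEqPos (pvAsgn t.2.1 t.2.2) = -1 <;> simp [he]

theorem pvStep_eq (lines : List (List Char)) (case_gap eq_gap : Int) (hcg : 0 ≤ case_gap)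
    (st : List (List Char) × Int) (g : List (Int × List Char × Int)) :
    pvStepA lines case_gap eq_gap st g = pvStepB lines case_gap eq_gap st g := by
  by_cases hg : g.length < 2
  · simp [pvStepA, pvStepB, hg]
  simp only [pvStepA, pvStepB, if_neg hg]
  -- the two label-length lists coincide
  have hmapM : (g.map pvParse).map (fun p => (p.2.1.length : Int)) =
      g.map (fun t => ((pvLabel t.2.1 t.2.2).length : Int)) := by
    rw [List.map_map]; rfl
  set M := g.map (fun t => ((pvLabel t.2.1 t.2.2).length : Int)) with hMdef
  -- the shared target column
  obtain ⟨m, hm⟩ : ∃ m, PySem.List.max? M (fun x => x) = some m := by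
    cases hx : PySem.List.max? M (fun x => x)
    · exfalso
      have : M = [] := (PySem.List.max?_eq_none_iff M (fun x => x)).mp hx
      have : g = [] := by simpa [hMdef] using this
      simp [this] at hg
    · exact ⟨_, rfl⟩
  have hmaxmem : ∀ t ∈ g, ((pvLabel t.2.1 t.2.2).length : Int) ≤ m := by
    intro t ht
    exact PySem.List.max?_isMax hm _ (by exact List.mem_map_of_mem ht)
  have hm0 : 0 ≤ m := by
    cases g with
    | nil => simp at hg
    | cons t0 g' =>
      have := hmaxmem t0 (by simp)
      have : (0 : Int) ≤ ((pvLabel t0.2.1 t0.2.2).length : Int) := by positivity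
      omega
  set target : Int := (PySem.List.max? M (fun x => x)).getD 0 + case_gap with htargdef
  have htB : PySem.List.maxD ((g.map pvParse).map (fun p => (p.2.1.length : Int))) (fun x => x) 0 + case_gap = target := by
    rw [hmapM]; rfl
  rw [htB]
  have h0t : 0 ≤ target := by rw [htargdef, hm]; simp; omega
  have hLt : ∀ t ∈ g, ((pvLabel t.2.1 t.2.2).length : Int) ≤ target := by
    intro t ht
    have := hmaxmem t ht
    rw [htargdef, hm]; simp; omega
  -- phase-1 ∘ phase-2 of A collapses to pvMkEntry on every member
  have hEq : (g.map (pvStep1A target)).map (pvEqInfoA target) = g.map (pvMkEntry target) := by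
    rw [List.map_map]
    exact List.map_congr_left (fun t ht => pvEntry_eq target t (hLt t ht) h0t)
  rw [hEq]
  -- both "has eq" lists project to the same lhs-length list
  have hfilterA : (g.map (pvMkEntry target)).filter (fun x => x.2.2.1 ≠ -1) =
      (g.filter (fun t => pvFindEqPos (pvAsgn t.2.1 t.2.2) ≠ -1)).map (pvMkEntry target) := by
    rw [List.filter_map]; rfl
  have hfilterB : (g.map pvParse).filter (fun p => p.2.2.2.1 ≠ -1) =
      (g.filter (fun t => pvFindEqPos (pvAsgn t.2.1 t.2.2) ≠ -1)).map pvParse := by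
    rw [List.filter_map]; rfl
  set gf := g.filter (fun t => pvFindEqPos (pvAsgn t.2.1 t.2.2) ≠ -1) with hgfdef
  have hlenA : ((g.map (pvMkEntry target)).filter (fun x => x.2.2.1 ≠ -1)).map (fun x => x.2.2.2) =
      gf.map (fun t => ((PySem.Chars.rstrip (PySem.List.slice (pvAsgn t.2.1 t.2.2) none
          (some (pvFindEqPos (pvAsgn t.2.1 t.2.2))))).length : Int)) := by
    rw [hfilterA, List.map_map]
    refine List.map_congr_left (fun t ht => ?_)
    have he : pvFindEqPos (pvAsgn t.2.1 t.2.2) ≠ -1 := by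
      have := List.of_mem_filter ht
      simpa using this
    simp [pvMkEntry, he]
  have hlenB : ((g.map pvParse).filter (fun p => p.2.2.2.1 ≠ -1)).map (fun p => (p.2.2.2.2.1.length : Int)) =
      gf.map (fun t => ((PySem.Chars.rstrip (PySem.List.slice (pvAsgn t.2.1 t.2.2) none
          (some (pvFindEqPos (pvAsgn t.2.1 t.2.2))))).length : Int)) := by
    rw [hfilterB, List.map_map]
    refine List.map_congr_left (fun t ht => ?_)
    have he : pvFindEqPos (pvAsgn t.2.1 t.2.2) ≠ -1 := by
      have := List.of_mem_filter ht
      simpa using this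
    simp [pvParse, he]
  set E : Int := target + (PySem.List.max? (gf.map (fun t =>
      ((PySem.Chars.rstrip (PySem.List.slice (pvAsgn t.2.1 t.2.2) none
          (some (pvFindEqPos (pvAsgn t.2.1 t.2.2))))).length : Int))) (fun x => x)).getD 0 + eq_gap
    with hEdef
  have hEB : target + PySem.List.maxD (((g.map pvParse).filter (fun p => p.2.2.2.1 ≠ -1)).map (fun p => (p.2.2.2.2.1.length : Int))) (fun x => x) 0 + eq_gap = E := by
    unfold PySem.List.maxD
    rw [hlenB]
  rw [hEB]
  -- A's optional eq column collapses to `if gf.isEmpty then none else some E`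
  have hopt : (if (((g.map (pvMkEntry target)).filter (fun x => x.2.2.1 ≠ -1)).isEmpty) then none
      else some (target + (PySem.List.max? (((g.map (pvMkEntry target)).filter
        (fun x => x.2.2.1 ≠ -1)).map (fun x => x.2.2.2)) (fun x => x)).getD 0 + eq_gap)) =
      (if gf.isEmpty then none else some E) := by
    rw [hlenA, hfilterA, hEdef]
    congr 1
    simp
  rw [hopt]
  rw [List.foldl_map, List.foldl_map]
  refine PySem.List.foldl_congr_mem g _ _ st (fun acc t ht => ?_)
  have hL := hLt t ht
  by_cases he : pvFindEqPos (pvAsgn t.2.1 t.2.2) = -1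
  · unfold pvRenderA pvRenderB
    cases hgf0 : gf.isEmpty <;> simp [pvMkEntry, pvParse, he]
  · have he0 : 0 ≤ pvFindEqPos (pvAsgn t.2.1 t.2.2) := pvFindEqPos_nonneg he
    have hmem : t ∈ gf := by
      rw [hgfdef]
      exact List.mem_filter.mpr ⟨ht, by simp [he]⟩
    have hgfne : gf.isEmpty = false := by
      simp
      exact List.ne_nil_of_mem hmem
    unfold pvRenderA pvRenderB
    simp only [hgfne, Bool.false_eq_true, if_false]
    simp [pvMkEntry, pvParse, he, pvNR_to hL h0t, pvNR_seg hL h0t he0, pvNR_after hL h0t he0]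


theorem align_case_groups_py_spec : Claim_equal_align_case_groups_py := by
  intro groups lines case_gap eq_gap _hDom hPre
  unfold Spec_align_case_groups_py align_case_groups_py align_case_groups_py_alt
  have h : (groups.map (fun g => g.map (fun t => (t.1, t.2.1.toList, t.2.2)))).foldl
        (pvStepA (lines.map String.toList) case_gap eq_gap) (lines.map String.toList, 0)
      = (groups.map (fun g => g.map (fun t => (t.1, t.2.1.toList, t.2.2)))).foldl
        (pvStepB (lines.map String.toList) case_gap eq_gap) (lines.map String.toList, 0) := by
    refine PySem.List.foldl_congr_mem _ _ _ _ (fun acc gC hgC => ?_)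
    obtain ⟨g0, hg0, rfl⟩ := List.mem_map.mp hgC
    by_cases h2 : (g0.map (fun t => (t.1, t.2.1.toList, t.2.2))).length < 2
    · unfold pvStepA pvStepB; rw [if_pos h2, if_pos h2]
    · have hlen : 2 ≤ g0.length := by simpa using Nat.le_of_not_lt h2
      exact pvStep_eq _ _ _ (hPre g0 hg0 hlen).1 acc _
  simp only [h]
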